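-- pv_equiv track=rewrite | github.com/kinhnb/keyword-analyze | ai_serp_keyword_research/metrics/exporters/prometheus.py | _parse_name_and_tags
-- ===== SOURCE A (Python) =====
-- from typing import Dict, Any, Optional, List, Tuple
--
-- def _parse_name_and_tags(name: str) -> Tuple[str, List[str], List[str]]:
--     """
--     Parse the metric name and embedded tags.
--
--     Returns:
--         Tuple of (base_name, labels, label_values)
--     """
--     # Check if the name contains tags
--     parts = name.split("_")
--     if len(parts) <= 1:
--         return name, [], []
--
--     # Attempt to parse tags
--     labels = []
--     label_values = []
--
--     # Start with the first part as the base name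
--     base_name = parts[0]
--
--     # Look for key-value pairs in the remaining parts
--     i = 1
--     while i < len(parts) - 1:
--         # Treat each odd-even pair as a key-value
--         labels.append(parts[i])
--         label_values.append(parts[i+1])
--         i += 2
--
--     # If there's an unpaired part at the end, append it to the base name
--     if i < len(parts):
--         base_name = f"{base_name}_{parts[i]}"
--
--     return base_name, labels, label_values
-- ===== SOURCE B (Python) =====
-- def _parse_name_and_tags(name):
--     parts = name.split("_")
--     if len(parts) <= 1:
--         return name, [], []
--     base_name = parts[0]
--     rest = parts[1:]
--     if len(rest) % 2 == 1:
--         # an unpaired trailing part: fold it into the base name up front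
--         base_name = f"{base_name}_{rest[-1]}"
--         rest = rest[:-1]
--     return base_name, rest[0::2], rest[1::2]
-- ===== Notes on version B (the rewrite author's own statement) =====
-- stated objective: simpler
-- what changed: B handles the unpaired trailing part up front by a parity check on parts[1:] (folding it into the base name and trimming it), then produces labels and values directly as the two strided slices rest[0::2] / rest[1::2], replacing A's index-stepping while loop with incremental appends and its post-loop leftover check.
import Mathlib
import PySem

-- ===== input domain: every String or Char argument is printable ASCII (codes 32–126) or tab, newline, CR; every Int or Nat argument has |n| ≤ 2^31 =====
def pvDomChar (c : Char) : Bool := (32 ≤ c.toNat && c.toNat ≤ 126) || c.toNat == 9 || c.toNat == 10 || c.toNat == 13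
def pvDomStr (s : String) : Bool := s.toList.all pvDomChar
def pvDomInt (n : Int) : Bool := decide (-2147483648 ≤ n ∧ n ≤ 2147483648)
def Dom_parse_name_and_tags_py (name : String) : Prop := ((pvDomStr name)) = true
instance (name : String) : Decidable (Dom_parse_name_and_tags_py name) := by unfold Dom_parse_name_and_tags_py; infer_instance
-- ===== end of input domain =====

-- B replaces A's index-stepping while loop by an up-front parity trim of the trailing
-- part followed by the two strided slices rest[0::2]/rest[1::2]; objective: simpler.

-- ===== PORT A =====
-- the while loop of A: i stepped by 2 while i < len(parts) - 1, appending parts[i] / parts[i+1];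
-- parts[i] and parts[i+1] are in range under the loop guard, so `getD ""` is exact here
def pvALoop (parts : List String) (i : Nat) (labels label_values : List String) :
    List String × List String × Nat :=
  if i < parts.length - 1 then
    pvALoop parts (i + 2) (labels ++ [(parts[i]?).getD ""]) (label_values ++ [(parts[i+1]?).getD ""])
  else (labels, label_values, i)
termination_by parts.length - i
decreasing_by omega

def parse_name_and_tags_py (name : String) : String × List String × List String :=
  let parts := (PySem.Str.split? name "_").getD [name]   -- sep "_" ≠ "", so split? is always `some`
  if parts.length ≤ 1 then (name, [], [])
  else
    let base_name := (parts[0]?).getD ""   -- parts is nonempty, so exact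
    let r := pvALoop parts 1 [] []
    let base_name := if r.2.2 < parts.length
      then base_name ++ "_" ++ (parts[r.2.2]?).getD "" else base_name
    (base_name, r.1, r.2.1)

-- ===== PORT B =====
-- exact port of l[k::2] after dropping k elements: keep one, skip one
def pvStride2 : List String → List String
  | [] => []
  | [x] => [x]
  | x :: _ :: xs => x :: pvStride2 xs

def parse_name_and_tags_py_alt (name : String) : String × List String × List String :=
  let parts := (PySem.Str.split? name "_").getD [name]
  if parts.length ≤ 1 then (name, [], [])
  else
    let base_name := (parts[0]?).getD ""
    let rest := PySem.List.slice parts (some 1) none      -- parts[1:]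
    if rest.length % 2 == 1 then
      let base_name := base_name ++ "_" ++ (PySem.List.pyGet? rest (-1)).getD ""  -- rest ≠ [], exact
      let rest := PySem.List.slice rest none (some (-1))  -- rest[:-1]
      (base_name, pvStride2 rest, pvStride2 (rest.drop 1))  -- rest[0::2], rest[1::2]
    else
      (base_name, pvStride2 rest, pvStride2 (rest.drop 1))

-- ===== PRECONDITION & SPEC =====
def Spec_parse_name_and_tags_py (name : String) (out : String × List String × List String) : Prop := out = parse_name_and_tags_py_alt name
instance (name : String) (out : String × List String × List String) : Decidable (Spec_parse_name_and_tags_py name out) := by unfold Spec_parse_name_and_tags_py; infer_instance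

-- ===== CLAIM (what is proved, stated in full; the proofs are below) =====
def Claim_equal_parse_name_and_tags_py : Prop := ∀ (name : String), Dom_parse_name_and_tags_py name → Spec_parse_name_and_tags_py name (parse_name_and_tags_py name)

-- ===== LEMMAS AND PROOFS =====

-- first / second components of the consecutive pairs of a list
def pvFirsts : List String → List String
  | a :: _ :: xs => a :: pvFirsts xs
  | _ => []

def pvSeconds : List String → List String
  | _ :: b :: xs => b :: pvSeconds xs
  | _ => []

theorem pvALoop_spec (r : List String) : ∀ (parts : List String) (i : Nat)
    (labels vals : List String), parts.drop i = r →
    pvALoop parts i labels vals =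
      (labels ++ pvFirsts r, vals ++ pvSeconds r, i + 2 * (r.length / 2)) := by
  induction r using pvFirsts.induct with
  | case1 a b xs ih =>
    intro parts i labels vals h
    have hlen : parts.length - i = (a :: b :: xs).length := by
      rw [← h, List.length_drop]
    have hcond : i < parts.length - 1 := by simp at hlen; omega
    have ha : parts[i]? = some a := by
      have h0 : (parts.drop i)[0]? = some a := by rw [h]; rfl
      rw [List.getElem?_drop] at h0; simpa using h0
    have hb : parts[i+1]? = some b := by
      have h1 : (parts.drop i)[1]? = some b := by rw [h]; rfl
      rw [List.getElem?_drop] at h1; simpa using h1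
    have hdrop : parts.drop (i + 2) = xs := by
      rw [← List.drop_drop, h]; rfl
    rw [pvALoop, if_pos hcond, ih parts (i + 2) _ _ hdrop, ha, hb]
    simp [pvFirsts, pvSeconds]
    omega
  | case2 r hr =>
    intro parts i labels vals h
    have hlen : parts.length - i = r.length := by rw [← h, List.length_drop]
    have hcond : ¬ i < parts.length - 1 := by
      rcases r with _ | ⟨a, _ | ⟨b, xs⟩⟩
      · simp at hlen; omega
      · simp at hlen; omega
      · exact absurd rfl (hr a b xs)
    have hr' : pvFirsts r = [] ∧ pvSeconds r = [] ∧ r.length / 2 = 0 := by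
      rcases r with _ | ⟨a, _ | ⟨b, xs⟩⟩
      · simp [pvFirsts, pvSeconds]
      · simp [pvFirsts, pvSeconds]
      · exact absurd rfl (hr a b xs)
    rw [pvALoop, if_neg hcond]
    simp [hr'.1, hr'.2.1, hr'.2.2]

theorem pvStride2_eq_firsts (r : List String) (h : r.length % 2 = 0) :
    pvStride2 r = pvFirsts r := by
  induction r using pvFirsts.induct with
  | case1 a b xs ih => simp at h; simp [pvStride2, pvFirsts, ih (by omega)]
  | case2 r hr =>
    rcases r with _ | ⟨a, _ | ⟨b, xs⟩⟩
    · rfl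
    · simp at h
    · exact absurd rfl (hr a b xs)

theorem pvStride2_tail_eq_seconds (r : List String) (h : r.length % 2 = 0) :
    pvStride2 (r.drop 1) = pvSeconds r := by
  induction r using pvFirsts.induct with
  | case1 a b xs ih =>
    simp at h
    rcases xs with _ | ⟨c, ys⟩
    · rfl
    · simpa [pvStride2, pvSeconds] using ih (by omega)
  | case2 r hr =>
    rcases r with _ | ⟨a, _ | ⟨b, xs⟩⟩
    · rfl
    · simp at h
    · exact absurd rfl (hr a b xs)

theorem pvFirsts_dropLast (r : List String) (h : r.length % 2 = 1) :
    pvFirsts r.dropLast = pvFirsts r := by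
  induction r using pvFirsts.induct with
  | case1 a b xs ih =>
    simp at h
    rcases xs with _ | ⟨c, ys⟩
    · simp at h
    · simpa [pvFirsts] using ih (by omega)
  | case2 r hr =>
    rcases r with _ | ⟨a, _ | ⟨b, xs⟩⟩
    · simp at h
    · rfl
    · exact absurd rfl (hr a b xs)

theorem pvSeconds_dropLast (r : List String) (h : r.length % 2 = 1) :
    pvSeconds r.dropLast = pvSeconds r := by
  induction r using pvFirsts.induct with
  | case1 a b xs ih =>
    simp at h
    rcases xs with _ | ⟨c, ys⟩
    · simp at h
    · simpa [pvSeconds] using ih (by omega)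
  | case2 r hr =>
    rcases r with _ | ⟨a, _ | ⟨b, xs⟩⟩
    · simp at h
    · rfl
    · exact absurd rfl (hr a b xs)

-- ===== VERDICT (by name: the statement is the Claim_ definition above) =====
theorem pvGetLast_aux (rest : List String) :
    (PySem.List.pyGet? rest (-1)) = rest[rest.length - 1]? := by
  rw [PySem.List.pyGet?_neg_one, List.getLast?_eq_getElem?]

theorem parse_name_and_tags_py_spec : Claim_equal_parse_name_and_tags_py := by
  intro name _
  unfold Spec_parse_name_and_tags_py parse_name_and_tags_py parse_name_and_tags_py_alt
  set parts := (PySem.Str.split? name "_").getD [name] with hp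
  clear_value parts
  by_cases hlen : parts.length ≤ 1
  · simp [hlen]
  · simp only [if_neg hlen]
    rcases parts with _ | ⟨p, rest⟩
    · simp at hlen
    have hrest : (p :: rest).drop 1 = rest := rfl
    rw [pvALoop_spec rest (p :: rest) 1 [] [] hrest]
    rw [PySem.List.slice_from_one]
    simp only [List.tail_cons, List.length_cons, List.nil_append]
    by_cases hodd : rest.length % 2 = 1
    · have hcond : 1 + 2 * (rest.length / 2) < rest.length + 1 := by omega
      have hidx : 1 + 2 * (rest.length / 2) = (rest.length - 1) + 1 := by omega
      have hget : (p :: rest)[1 + 2 * (rest.length / 2)]? = rest[rest.length - 1]? := by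
        rw [hidx]; exact List.getElem?_cons_succ
      rw [PySem.List.slice_to_neg_one]
      have heven : rest.dropLast.length % 2 = 0 := by
        simp [List.length_dropLast]; omega
      simp only [if_pos hcond, hget, hodd,
        pvStride2_eq_firsts _ heven, pvStride2_tail_eq_seconds _ heven,
        pvFirsts_dropLast _ hodd, pvSeconds_dropLast _ hodd,
        pvGetLast_aux]
      simp
    · have heven : rest.length % 2 = 0 := by omega
      have hcond : ¬ (1 + 2 * (rest.length / 2) < rest.length + 1) := by omega
      have hodd' : ¬ (rest.length % 2 == 1) = true := by simpa using hodd
      simp only [if_neg hcond, if_neg hodd',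
        pvStride2_eq_firsts _ heven, pvStride2_tail_eq_seconds _ heven]
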